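-- pv_equiv track=rewrite | github.com/shriyasingh-cpu/auto-analysis | crash_analyzer.py | determine_verdict
-- ===== SOURCE A (Python) =====
-- CRASH_KEYWORDS = [
--     "crash", "flip", "loss of control", "altitude loss", "freefall",
--     "motor failure", "ekf", "voltage collapse", "rc signal loss", "cutout",
--     "failsafe", "nose-dive",
-- ]
--
-- def determine_verdict(events: list):
--     criticals = [e for e in events if e["status"] == "[CRITICAL]"]
--     warnings  = [e for e in events if e["status"] == "[WARNING]"]
--     evidence  = [e for e in criticals if any(
--         kw in e["interpretation"].lower() for kw in CRASH_KEYWORDS)]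
--
--     if evidence:
--         verdict = "CRASH LIKELY — Critical anomalies matching crash patterns"
--     elif len(criticals) >= 2:
--         verdict = "PROBABLE INCIDENT — Multiple critical parameters exceeded"
--     elif criticals:
--         verdict = "POSSIBLE INCIDENT — Single critical anomaly found"
--     elif warnings:
--         verdict = "CAUTION — Warnings detected, review recommended"
--     else:
--         verdict = "NO CRASH INDICATORS — Flight appears nominal"
--
--     return verdict, evidence
-- ===== SOURCE B (Python) =====
-- CRASH_KEYWORDS = [
--     "crash", "flip", "loss of control", "altitude loss", "freefall",
--     "motor failure", "ekf", "voltage collapse", "rc signal loss", "cutout",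
--     "failsafe", "nose-dive",
-- ]
--
-- def _severity(e):
--     if e["status"] == "[CRITICAL]":
--         if any(kw in e["interpretation"].lower() for kw in CRASH_KEYWORDS):
--             return 3
--         return 2
--     if e["status"] == "[WARNING]":
--         return 1
--     return 0
--
-- def determine_verdict(events: list):
--     scores = [_severity(e) for e in events]
--     top2 = sorted(scores, reverse=True)[:2]
--     if top2 and top2[0] == 3:
--         verdict = "CRASH LIKELY — Critical anomalies matching crash patterns"
--     elif len(top2) == 2 and top2[1] >= 2:
--         verdict = "PROBABLE INCIDENT — Multiple critical parameters exceeded"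
--     elif top2 and top2[0] == 2:
--         verdict = "POSSIBLE INCIDENT — Single critical anomaly found"
--     elif top2 and top2[0] == 1:
--         verdict = "CAUTION — Warnings detected, review recommended"
--     else:
--         verdict = "NO CRASH INDICATORS — Flight appears nominal"
--     evidence = [e for e, s in zip(events, scores) if s == 3]
--     return verdict, evidence
-- ===== Notes on version B (the rewrite author's own statement) =====
-- stated objective: alternative
-- what changed: B maps each event to a numeric severity score (3 critical-with-crash-keyword, 2 critical, 1 warning, 0 other), sorts the scores descending and reads the verdict off the top two scores, instead of A's three status-filtered lists and length/emptiness tests.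
import Mathlib
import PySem

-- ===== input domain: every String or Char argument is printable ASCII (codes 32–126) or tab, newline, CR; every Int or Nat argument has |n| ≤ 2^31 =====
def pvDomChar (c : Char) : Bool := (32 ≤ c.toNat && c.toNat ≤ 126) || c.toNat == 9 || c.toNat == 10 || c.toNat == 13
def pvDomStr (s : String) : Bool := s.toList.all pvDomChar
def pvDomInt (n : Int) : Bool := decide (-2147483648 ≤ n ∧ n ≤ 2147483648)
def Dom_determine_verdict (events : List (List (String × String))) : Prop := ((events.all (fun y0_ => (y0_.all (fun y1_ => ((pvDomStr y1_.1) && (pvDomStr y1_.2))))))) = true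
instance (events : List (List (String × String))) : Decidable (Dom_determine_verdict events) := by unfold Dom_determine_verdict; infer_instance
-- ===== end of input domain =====

-- B replaces A's status-filter lists by a numeric severity score per event (3/2/1/0),
-- sorts the scores descending and reads the verdict off the top two (objective: alternative).

-- shared helpers: dict lookup (first match; none = KeyError) and the comprehension predicates
def pvGet (e : List (String × String)) (k : String) : Option String :=
  (e.find? (fun p => p.1 == k)).map (·.2)

def pvCrashKeywords : List String :=
  ["crash", "flip", "loss of control", "altitude loss", "freefall",
   "motor failure", "ekf", "voltage collapse", "rc signal loss", "cutout",
   "failsafe", "nose-dive"]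

def pvHasCrashKw (interp : String) : Bool :=
  pvCrashKeywords.any (fun kw => PySem.Str.isIn kw (PySem.Str.lower interp))

def pvCrit (e : List (String × String)) : Bool := pvGet e "status" == some "[CRITICAL]"
def pvWarn (e : List (String × String)) : Bool := pvGet e "status" == some "[WARNING]"
def pvQ (e : List (String × String)) : Bool := pvHasCrashKw ((pvGet e "interpretation").getD "")

-- ===== PORT A =====
def determine_verdict (events : List (List (String × String))) : String × (List (List (String × String))) :=
  let criticals := events.filter pvCrit
  let warnings := events.filter pvWarn
  let evidence := criticals.filter pvQ
  let verdict :=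
    if !evidence.isEmpty then "CRASH LIKELY — Critical anomalies matching crash patterns"
    else if 2 ≤ criticals.length then "PROBABLE INCIDENT — Multiple critical parameters exceeded"
    else if !criticals.isEmpty then "POSSIBLE INCIDENT — Single critical anomaly found"
    else if !warnings.isEmpty then "CAUTION — Warnings detected, review recommended"
    else "NO CRASH INDICATORS — Flight appears nominal"
  (verdict, evidence)

-- ===== PORT B =====
def pvSeverity (e : List (String × String)) : Int :=
  if pvGet e "status" == some "[CRITICAL]" then
    if pvHasCrashKw ((pvGet e "interpretation").getD "") then 3 else 2
  else if pvGet e "status" == some "[WARNING]" then 1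
  else 0

def determine_verdict_alt (events : List (List (String × String))) : String × (List (List (String × String))) :=
  let scores := events.map pvSeverity
  let top2 := PySem.List.slice (PySem.List.sorted scores (fun s => s) true) none (some 2)
  let verdict :=
    if !top2.isEmpty && (PySem.List.pyGetD top2 0 0 == 3) then
      "CRASH LIKELY — Critical anomalies matching crash patterns"
    else if top2.length == 2 && decide (2 ≤ PySem.List.pyGetD top2 1 0) then
      "PROBABLE INCIDENT — Multiple critical parameters exceeded"
    else if !top2.isEmpty && (PySem.List.pyGetD top2 0 0 == 2) then
      "POSSIBLE INCIDENT — Single critical anomaly found"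
    else if !top2.isEmpty && (PySem.List.pyGetD top2 0 0 == 1) then
      "CAUTION — Warnings detected, review recommended"
    else "NO CRASH INDICATORS — Flight appears nominal"
  let evidence := ((events.zip scores).filter (fun p => p.2 == 3)).map (·.1)
  (verdict, evidence)

-- ===== PRECONDITION & SPEC =====
-- Pre_ excludes exactly the inputs where Python A raises KeyError: an event with no "status"
-- key, or a critical event with no "interpretation" key.
def Pre_determine_verdict (events : List (List (String × String))) : Prop :=
  (events.all (fun e =>
    (pvGet e "status").isSome &&
    (pvGet e "status" != some "[CRITICAL]" || (pvGet e "interpretation").isSome))) = true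
instance (events : List (List (String × String))) : Decidable (Pre_determine_verdict events) := by
  unfold Pre_determine_verdict; infer_instance

def pvWitness_determine_verdict : (List (List (String × String))) :=
  [[("status", "[CRITICAL]"), ("interpretation", "EKF failure then crash")],
   [("status", "[WARNING]")]]

def Spec_determine_verdict (events : List (List (String × String))) (out : String × (List (List (String × String)))) : Prop := out = determine_verdict_alt events
instance (events : List (List (String × String))) (out : String × (List (List (String × String)))) : Decidable (Spec_determine_verdict events out) := by unfold Spec_determine_verdict; infer_instance

-- ===== CLAIM (what is proved, stated in full; the proofs are below) =====
def Claim_equal_determine_verdict : Prop := ∀ (events : List (List (String × String))), Dom_determine_verdict events → Pre_determine_verdict events → Spec_determine_verdict events (determine_verdict events)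

-- ===== LEMMAS AND PROOFS =====

theorem pvSev_eq_three (e : List (String × String)) :
    (pvSeverity e = 3) ↔ (pvQ e && pvCrit e) = true := by
  unfold pvSeverity pvQ pvCrit
  split_ifs with h1 h2 h3 <;> simp_all

theorem pvTwo_le_sev (e : List (String × String)) :
    (2 ≤ pvSeverity e) ↔ pvCrit e = true := by
  unfold pvSeverity pvCrit
  split_ifs with h1 h2 h3 <;> simp_all

theorem pvSev_eq_one (e : List (String × String)) :
    (pvSeverity e = 1) ↔ pvWarn e = true := by
  unfold pvSeverity pvWarn
  split_ifs with h1 h2 h3 <;> simp_all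

theorem pvSev_le_three (e : List (String × String)) : pvSeverity e ≤ 3 := by
  unfold pvSeverity; split_ifs <;> omega

-- evidence: the zip-comprehension equals A's double filter
theorem pvEvidence_eq (l : List (List (String × String))) :
    ((l.zip (l.map pvSeverity)).filter (fun p => p.2 == 3)).map (·.1) =
      (l.filter pvCrit).filter pvQ := by
  rw [List.filter_filter]
  induction l with
  | nil => rfl
  | cons e t ih =>
    simp only [List.map_cons, List.zip_cons_cons, List.filter_cons]
    by_cases h : pvSeverity e = 3
    · have hq : (pvQ e && pvCrit e) = true := (pvSev_eq_three e).1 h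
      simp [h, hq, ih]
    · have hq : (pvQ e && pvCrit e) = false := by
        by_contra hc
        exact h ((pvSev_eq_three e).2 (by revert hc; cases (pvQ e && pvCrit e) <;> simp))
      simp [h, hq, ih]

-- the verdict read off the top two of a descending list, in terms of plain conditions on t
theorem pvTop_verdict (t : List Int) (hpw : t.Pairwise (fun a b : Int => b ≤ a))
    (hb : ∀ s ∈ t, s ≤ 3) :
    (let top2 := PySem.List.slice t none (some 2)
     if !top2.isEmpty && (PySem.List.pyGetD top2 0 0 == 3) then
       "CRASH LIKELY — Critical anomalies matching crash patterns"
     else if top2.length == 2 && decide (2 ≤ PySem.List.pyGetD top2 1 0) then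
       "PROBABLE INCIDENT — Multiple critical parameters exceeded"
     else if !top2.isEmpty && (PySem.List.pyGetD top2 0 0 == 2) then
       "POSSIBLE INCIDENT — Single critical anomaly found"
     else if !top2.isEmpty && (PySem.List.pyGetD top2 0 0 == 1) then
       "CAUTION — Warnings detected, review recommended"
     else "NO CRASH INDICATORS — Flight appears nominal") =
    (if (3:Int) ∈ t then "CRASH LIKELY — Critical anomalies matching crash patterns"
     else if 2 ≤ t.countP (fun s => decide (2 ≤ s)) then "PROBABLE INCIDENT — Multiple critical parameters exceeded"
     else if ∃ s ∈ t, 2 ≤ s then "POSSIBLE INCIDENT — Single critical anomaly found"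
     else if (1:Int) ∈ t then "CAUTION — Warnings detected, review recommended"
     else "NO CRASH INDICATORS — Flight appears nominal") := by
  have hsl : PySem.List.slice t none (some 2) = t.take 2 := by
    simpa using PySem.List.slice_to_natCast t 2
  match t, hpw, hb with
  | [], _, _ => simp [hsl]
  | [a], _, hb =>
    have ha3 : a ≤ 3 := hb a (by simp)
    have hsltake : PySem.List.slice [a] none (some 2) = [a] := by rw [hsl]; rfl
    have hm3 : ((3:Int) ∈ [a]) ↔ a = 3 := by simp [eq_comm]
    have hcnt : ¬ (2 ≤ List.countP (fun s => decide ((2:Int) ≤ s)) [a]) := by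
      simp only [List.countP_cons, List.countP_nil]
      split_ifs <;> omega
    have hex1 : (∃ s ∈ [a], (2:Int) ≤ s) ↔ 2 ≤ a := by simp
    have hm1 : ((1:Int) ∈ [a]) ↔ a = 1 := by simp [eq_comm]
    simp only [hsltake, List.isEmpty_cons, Bool.not_false, Bool.true_and,
      PySem.List.pyGetD_zero_cons, List.length_cons, List.length_nil, hm3, hex1, hm1]
    by_cases h3 : a = 3
    · simp [h3]
    · by_cases h2 : a = 2
      · simp [h2]
      · by_cases h1 : a = 1
        · simp [h1]
        · have hna : ¬ (2:Int) ≤ a := by omega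
          simp [h3, h2, h1, hna]
  | a :: b :: r, hpw, hb =>
    have hmaxt : ∀ x ∈ b :: r, x ≤ a := by
      intro x hx; exact (List.pairwise_cons.1 hpw).1 x hx
    have hmaxr : ∀ x ∈ r, x ≤ b := by
      intro x hx; exact (List.pairwise_cons.1 (List.pairwise_cons.1 hpw).2).1 x hx
    have ha3 : a ≤ 3 := hb a (by simp)
    have hsltake : PySem.List.slice (a :: b :: r) none (some 2) = [a, b] := by
      rw [hsl]; rfl
    have h3mem : ((3:Int) ∈ a :: b :: r) ↔ a = 3 := by
      constructor
      · intro h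
        rcases List.mem_cons.1 h with h | h
        · omega
        · have := hmaxt 3 h; omega
      · intro h; simp [h]
    have hcount : (2 ≤ (a :: b :: r).countP (fun s => decide (2 ≤ s))) ↔ 2 ≤ b := by
      constructor
      · intro h
        by_contra hc
        have hz : (b :: r).countP (fun s => decide ((2:Int) ≤ s)) = 0 := by
          rw [List.countP_eq_zero]
          intro x hx
          have hxb : x ≤ b := by
            rcases List.mem_cons.1 hx with h' | h'
            · omega
            · exact hmaxr x h'
          simp only [decide_eq_true_eq]; omega
        rw [List.countP_cons, hz] at h
        split_ifs at h <;> omega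
      · intro h
        have hab : b ≤ a := hmaxt b (by simp)
        have h2a : decide ((2:Int) ≤ a) = true := by simp only [decide_eq_true_eq]; omega
        have h2b : decide ((2:Int) ≤ b) = true := by simp only [decide_eq_true_eq]; omega
        simp only [List.countP_cons, h2a, h2b, if_true]
        omega
    have hex : (∃ s ∈ a :: b :: r, (2:Int) ≤ s) ↔ 2 ≤ a := by
      constructor
      · rintro ⟨s, hs, hss⟩
        rcases List.mem_cons.1 hs with h' | h'
        · omega
        · have := hmaxt s h'; omega
      · intro h; exact ⟨a, by simp, h⟩
    have hg1 : PySem.List.pyGetD [a, b] 1 0 = b := by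
      simpa using PySem.List.pyGetD_natCast [a, b] 1 0
    have h1mem : ¬ (2 ≤ a) → (((1:Int) ∈ a :: b :: r) ↔ a = 1) := by
      intro hna
      constructor
      · intro h
        rcases List.mem_cons.1 h with h' | h'
        · omega
        · have := hmaxt 1 h'; omega
      · intro h; simp [h]
    simp only [hsltake, List.isEmpty_cons, Bool.not_false, Bool.true_and,
      PySem.List.pyGetD_zero_cons, List.length_cons, List.length_nil,
      hg1, h3mem, hcount, hex]
    by_cases c1 : a = 3
    · simp [c1]
    · by_cases c2 : 2 ≤ b
      · simp [c1, c2]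
      · by_cases c3 : a = 2
        · simp [c2, c3]
        · have hna : ¬ (2:Int) ≤ a := by omega
          simp only [h1mem hna]
          by_cases c4 : a = 1
          · simp [c2, c4]
          · simp [c1, c2, c3, c4, hna]

-- bridge each of A's four conditions to a condition on the score list
theorem pvA1' (l : List (List (String × String))) :
    (((l.filter pvCrit).filter pvQ) = []) ↔ ¬ ((3:Int) ∈ l.map pvSeverity) := by
  rw [List.filter_filter, List.filter_eq_nil_iff]
  constructor
  · intro h hm
    obtain ⟨e, he, hse⟩ := List.mem_map.1 hm
    exact absurd ((pvSev_eq_three e).1 hse) (by simpa using h e he)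
  · intro h e he hq
    exact h (List.mem_map.2 ⟨e, he, (pvSev_eq_three e).2 hq⟩)

theorem pvA2 (l : List (List (String × String))) :
    (l.filter pvCrit).length = (l.map pvSeverity).countP (fun s => decide (2 ≤ s)) := by
  rw [List.countP_map, ← List.countP_eq_length_filter]
  apply List.countP_congr
  intro e _
  simp only [Function.comp]
  constructor
  · intro h; simpa using (pvTwo_le_sev e).2 (by simpa using h)
  · intro h; simpa using (pvTwo_le_sev e).1 (by simpa using h)

theorem pvA3 (l : List (List (String × String))) :
    ((l.filter pvCrit) = []) ↔ ¬ (∃ s ∈ l.map pvSeverity, (2:Int) ≤ s) := by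
  rw [List.filter_eq_nil_iff]
  constructor
  · rintro h ⟨s, hs, hss⟩
    obtain ⟨e, he, hse⟩ := List.mem_map.1 hs
    exact absurd ((pvTwo_le_sev e).1 (hse ▸ hss)) (by simpa using h e he)
  · intro h e he hc
    exact h ⟨pvSeverity e, List.mem_map.2 ⟨e, he, rfl⟩, (pvTwo_le_sev e).2 hc⟩

theorem pvA4 (l : List (List (String × String))) :
    ((l.filter pvWarn) = []) ↔ ¬ ((1:Int) ∈ l.map pvSeverity) := by
  rw [List.filter_eq_nil_iff]
  constructor
  · intro h hm
    obtain ⟨e, he, hse⟩ := List.mem_map.1 hm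
    exact absurd ((pvSev_eq_one e).1 hse) (by simpa using h e he)
  · intro h e he hw
    exact h (List.mem_map.2 ⟨e, he, (pvSev_eq_one e).2 hw⟩)

-- ===== VERDICT (by name: the statement is the Claim_ definition above) =====
theorem determine_verdict_spec : Claim_equal_determine_verdict := by
  intro events _ _
  unfold Spec_determine_verdict determine_verdict determine_verdict_alt
  have hperm : (PySem.List.sorted (events.map pvSeverity) (fun s => s) true).Perm
      (events.map pvSeverity) := PySem.List.sorted_perm _ _ _
  have hpw : (PySem.List.sorted (events.map pvSeverity) (fun s => s) true).Pairwise
      (fun a b : Int => b ≤ a) := by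
    simpa using PySem.List.sorted_pairwise_rev (events.map pvSeverity) (fun s => s)
  have hb3 : ∀ s ∈ PySem.List.sorted (events.map pvSeverity) (fun s => s) true, s ≤ 3 := by
    intro s hs
    obtain ⟨e, _, hse⟩ := List.mem_map.1 (hperm.mem_iff.1 hs)
    exact hse ▸ pvSev_le_three e
  refine Prod.ext ?_ ?_
  · dsimp only
    rw [pvTop_verdict _ hpw hb3]
    have hmem3 : ((3:Int) ∈ PySem.List.sorted (events.map pvSeverity) (fun s => s) true) ↔
        (3:Int) ∈ events.map pvSeverity := hperm.mem_iff
    have hcnt : (PySem.List.sorted (events.map pvSeverity) (fun s => s) true).countP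
        (fun s => decide (2 ≤ s)) = (events.map pvSeverity).countP (fun s => decide (2 ≤ s)) :=
      hperm.countP_eq _
    have hex2 : (∃ s ∈ PySem.List.sorted (events.map pvSeverity) (fun s => s) true, (2:Int) ≤ s) ↔
        ∃ s ∈ events.map pvSeverity, (2:Int) ≤ s := by
      constructor <;>
        (rintro ⟨s, hs, hss⟩;
         exact ⟨s, by first | exact hperm.mem_iff.1 hs | exact hperm.mem_iff.2 hs, hss⟩)
    have hmem1 : ((1:Int) ∈ PySem.List.sorted (events.map pvSeverity) (fun s => s) true) ↔
        (1:Int) ∈ events.map pvSeverity := hperm.mem_iff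
    simp only [hmem3, hcnt, hex2, hmem1, Bool.not_eq_true']
    have e1 : (((events.filter pvCrit).filter pvQ).isEmpty = false) ↔
        (3:Int) ∈ events.map pvSeverity := by
      rw [List.isEmpty_eq_false_iff, ← not_iff_not, not_not, pvA1' events]
    have e2 := pvA2 events
    have e3 : ((events.filter pvCrit).isEmpty = false) ↔
        ∃ s ∈ events.map pvSeverity, (2:Int) ≤ s := by
      rw [List.isEmpty_eq_false_iff, ← not_iff_not, not_not, pvA3 events]
    have e4 : ((events.filter pvWarn).isEmpty = false) ↔
        (1:Int) ∈ events.map pvSeverity := by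
      rw [List.isEmpty_eq_false_iff, ← not_iff_not, not_not, pvA4 events]
    rw [e2]
    simp only [e1, e3, e4]
  · dsimp only
    exact (pvEvidence_eq events).symm
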